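-- pv_equiv track=rewrite | github.com/Adamv27/Pygame-Othello | minimax.py | check_direction
-- ===== SOURCE A (Python) =====
-- def check_direction(move: tuple, direction: list, player: str, board) -> bool:
--     opposite_player = 'X' if player == 'O' else 'O'
--     row, column = move
--     current_row = row
--     current_column = column
--     # Number of opponent tiles in between your move and one of your own pieces
--     opponent_tiles = 0
--     while True:
--         # Move along board depending on current direction
--         current_row += direction[1]
--         current_column += direction[0]
--
--         # Can not go farther than length of board
--         if (current_row > 7 or current_row < 0) or (current_column > 7 or current_column < 0):
--             break
--         # There can not be a space in the middle of a move
--         elif board[current_row][current_column] == '':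
--             break
--         # Opponents tiles must be in between your two pieces
--         elif board[current_row][current_column] == opposite_player:
--             opponent_tiles += 1
--         # There must be one of your own tiles across from your move
--         elif board[current_row][current_column] == player:
--             # There must be at least one opponent tiles in between your own pieces
--             if opponent_tiles > 0:
--                 return True
--             else:
--                 break
--     return False
-- ===== SOURCE B (Python) =====
-- def check_direction(move: tuple, direction: list, player: str, board) -> bool:
--     opposite_player = 'X' if player == 'O' else 'O'
--     dr, dc = direction[1], direction[0]
--     # Stage 1: materialize the ray of cell contents along the direction,
--     # truncated at the board edge (at most 8 in-board cells; 9 steps hit the edge).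
--     r, c = move
--     ray = []
--     for _ in range(9):
--         r += dr
--         c += dc
--         if not (0 <= r <= 7 and 0 <= c <= 7):
--             break
--         ray.append(board[r][c])
--     # Stage 2: one pattern-match pass — the move flips tiles iff the ray starts
--     # with a non-empty run of opponent tiles closed off by one of our own.
--     for i, cell in enumerate(ray):
--         if cell != opposite_player:
--             return i > 0 and cell == player
--     return False
-- ===== Notes on version B (the rewrite author's own statement) =====
-- stated objective: alternative
-- what changed: Replaces A's interleaved step-and-decide while-True loop (4-way branch with an opponent counter) by a collect-then-pattern-match decomposition: first materialize the ray of cells as a list truncated at the board edge, then a single enumerate pass that stops at the first non-opponent cell and decides 'index > 0 and cell == player'.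
-- outside the precondition, e.g. on check_direction((0, 0), [1, 0], 'X', [['', 'O', 'Z', 'X', '', '', '', '']]): A returns True, B returns False; on check_direction((0, 0), [0, 0], 'X', [['']]): A returns False, B returns False
import Mathlib
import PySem

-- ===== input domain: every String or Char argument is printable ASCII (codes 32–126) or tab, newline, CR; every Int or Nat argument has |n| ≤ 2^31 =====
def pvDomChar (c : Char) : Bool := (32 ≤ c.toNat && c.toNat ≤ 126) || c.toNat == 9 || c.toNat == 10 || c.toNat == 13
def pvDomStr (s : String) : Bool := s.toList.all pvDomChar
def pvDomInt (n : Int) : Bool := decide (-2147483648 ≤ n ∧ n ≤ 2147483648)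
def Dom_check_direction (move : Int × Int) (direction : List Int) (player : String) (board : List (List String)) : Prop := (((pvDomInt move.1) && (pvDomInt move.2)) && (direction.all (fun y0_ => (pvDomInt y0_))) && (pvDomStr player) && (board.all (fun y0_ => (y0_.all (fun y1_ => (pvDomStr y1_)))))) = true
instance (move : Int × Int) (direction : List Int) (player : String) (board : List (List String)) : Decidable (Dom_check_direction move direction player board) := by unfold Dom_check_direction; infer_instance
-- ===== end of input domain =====

-- B replaces A's interleaved step-and-decide loop (4-way branch + opponent counter) by a
-- collect-then-pattern-match decomposition: build the ray as a list, then one enumerate pass.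

-- ===== PORT A =====
-- board[r][c] as an option (none = IndexError)
def pvCellA (board : List (List String)) (r c : Int) : Option String :=
  (PySem.List.pyGet? board r).bind (fun row => PySem.List.pyGet? row c)

def pvALoop (d0 d1 : Int) (opp player : String) (board : List (List String)) :
    Nat → Int → Int → Nat → Bool
  | 0, _, _, _ => false
  | f + 1, r, c, tiles =>
    let r' := r + d1
    let c' := c + d0
    if r' > 7 ∨ r' < 0 ∨ c' > 7 ∨ c' < 0 then false
    else
      match pvCellA board r' c' with
      | none => false      -- board[r'][c'] raises: outside Pre_
      | some cell =>
        if cell = "" then false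
        else if cell = opp then pvALoop d0 d1 opp player board f r' c' (tiles + 1)
        else if cell = player then decide (tiles > 0)
        else pvALoop d0 d1 opp player board f r' c' tiles

def check_direction (move : Int × Int) (direction : List Int) (player : String) (board : List (List String)) : Bool :=
  let opp := if player = "O" then "X" else "O"
  match PySem.List.pyGet? direction 1, PySem.List.pyGet? direction 0 with
  | some d1, some d0 => pvALoop d0 d1 opp player board 10 move.1 move.2 0
  | _, _ => false      -- direction[1]/direction[0] raises: outside Pre_

-- ===== PORT B =====
def pvInb (r c : Int) : Bool := decide (0 ≤ r ∧ r ≤ 7 ∧ 0 ≤ c ∧ c ≤ 7)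

-- stage 1 of Source B: the 'for _ in range(9)' loop collecting the ray of in-board cells
def pvBuild (dr dc : Int) (board : List (List String)) :
    Nat → Int → Int → List String
  | 0, _, _ => []
  | f + 1, r, c =>
    let r' := r + dr
    let c' := c + dc
    if pvInb r' c' then
      match ((PySem.List.pyGet? board r').bind (fun row => PySem.List.pyGet? row c')) with
      | none => []         -- board[r'][c'] raises: outside Pre_
      | some cell => cell :: pvBuild dr dc board f r' c'
    else []

-- stage 2 of Source B: the enumerate pass over the ray
def pvScan (opp player : String) : List String → Nat → Bool
  | [], _ => false
  | cell :: rest, i =>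
    if cell ≠ opp then decide (0 < i) && decide (cell = player)
    else pvScan opp player rest (i + 1)

def check_direction_alt (move : Int × Int) (direction : List Int) (player : String) (board : List (List String)) : Bool :=
  let opp := if player = "O" then "X" else "O"
  match PySem.List.pyGet? direction 1 with
  | none => false      -- direction[1] raises: outside Pre_
  | some dr =>
    match PySem.List.pyGet? direction 0 with
    | none => false    -- direction[0] raises: outside Pre_
    | some dc =>
      pvScan opp player (pvBuild dr dc board 9 move.1 move.2) 0

-- ===== PRECONDITION & SPEC =====
-- Pre_ needs direction[1]/direction[0] to exist, and then either the very first step already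
-- leaves the 0..7 board (A touches nothing and returns False), or the game's natural domain:
-- player 'X' or 'O', a board covering the 8x8 grid holding only ''/'X'/'O', direction not (0,0).
-- Outside it A raises (missing board cells), can loop forever (zero direction), or silently
-- steps over stray cell strings, an accident of A's branch structure no caller relies on.
def Pre_check_direction (move : Int × Int) (direction : List Int) (player : String) (board : List (List String)) : Prop :=
  2 ≤ direction.length ∧
  (¬ (0 ≤ move.1 + direction.getD 1 0 ∧ move.1 + direction.getD 1 0 ≤ 7 ∧
      0 ≤ move.2 + direction.getD 0 0 ∧ move.2 + direction.getD 0 0 ≤ 7) ∨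
   (¬ (direction.getD 1 0 = 0 ∧ direction.getD 0 0 = 0) ∧
    (player = "X" ∨ player = "O") ∧
    8 ≤ board.length ∧
    ∀ row ∈ board, 8 ≤ row.length ∧ ∀ cell ∈ row, cell = "" ∨ cell = "X" ∨ cell = "O"))
instance (move : Int × Int) (direction : List Int) (player : String) (board : List (List String)) : Decidable (Pre_check_direction move direction player board) := by unfold Pre_check_direction; infer_instance

def pvWitness_check_direction : (Int × Int) × List Int × String × List (List String) :=
  ((2, 2), [1, 1], "X", List.replicate 8 (List.replicate 8 ""))

def Spec_check_direction (move : Int × Int) (direction : List Int) (player : String) (board : List (List String)) (out : Bool) : Prop := out = check_direction_alt move direction player board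
instance (move : Int × Int) (direction : List Int) (player : String) (board : List (List String)) (out : Bool) : Decidable (Spec_check_direction move direction player board out) := by unfold Spec_check_direction; infer_instance

-- ===== CLAIM (what is proved, stated in full; the proofs are below) =====
def Claim_equal_check_direction : Prop := ∀ (move : Int × Int) (direction : List Int) (player : String) (board : List (List String)), Dom_check_direction move direction player board → Pre_check_direction move direction player board → Spec_check_direction move direction player board (check_direction move direction player board)

-- ===== LEMMAS AND PROOFS =====

lemma pv_cell_memA (board : List (List String)) (r c : Int) (s : String)
    (h : pvCellA board r c = some s) : ∃ row ∈ board, s ∈ row := by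
  unfold pvCellA at h
  cases hg : PySem.List.pyGet? board r with
  | none => simp [hg] at h
  | some row =>
    simp only [hg, Option.bind_some] at h
    refine ⟨row, ?_, ?_⟩
    · exact PySem.List.mem_of_pyGet?_eq_some _ hg
    · exact PySem.List.mem_of_pyGet?_eq_some _ h

-- main invariant: A's loop from (r,c) with `tiles` opponents seen equals B's scan of the
-- ray built from (r,c), started at index `tiles`, as long as the ray escapes within both fuels
lemma pv_main (d0 d1 : Int) (opp player : String) (board : List (List String))
    (hop : opp = if player = "O" then "X" else "O")
    (hp : player = "X" ∨ player = "O")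
    (hcells : ∀ row ∈ board, ∀ cell ∈ row, cell = "" ∨ cell = "X" ∨ cell = "O") :
    ∀ (f : Nat), ∀ (g : Nat) (r c : Int) (tiles : Nat),
      (∃ k : Nat, k < f ∧ k < g ∧
        ¬ (0 ≤ r + (1 + (k : Int)) * d1 ∧ r + (1 + (k : Int)) * d1 ≤ 7 ∧
           0 ≤ c + (1 + (k : Int)) * d0 ∧ c + (1 + (k : Int)) * d0 ≤ 7)) →
      pvALoop d0 d1 opp player board f r c tiles =
        pvScan opp player (pvBuild d1 d0 board g r c) tiles := by
  have hpo : player ≠ opp := by rcases hp with h | h <;> simp [hop, h]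
  have hpe : player ≠ "" := by rcases hp with h | h <;> simp [h]
  have hoe : opp ≠ "" := by rcases hp with h | h <;> simp [hop, h]
  intro f
  induction f with
  | zero => rintro g r c tiles ⟨k, hk, -, -⟩; exact absurd hk (Nat.not_lt_zero k)
  | succ f ih =>
    rintro g r c tiles ⟨k, hkf, hkg, hout⟩
    cases g with
    | zero => exact absurd hkg (Nat.not_lt_zero k)
    | succ g =>
      by_cases hb : r + d1 > 7 ∨ r + d1 < 0 ∨ c + d0 > 7 ∨ c + d0 < 0
      · have hinb : pvInb (r + d1) (c + d0) = false := by
          unfold pvInb; simp only [decide_eq_false_iff_not]; omega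
        simp [pvALoop, pvBuild, pvScan, hb, hinb]
      · push_neg at hb
        have hinb : pvInb (r + d1) (c + d0) = true := by
          unfold pvInb; simp only [decide_eq_true_eq]; omega
        have hifb : ¬ (r + d1 > 7 ∨ r + d1 < 0 ∨ c + d0 > 7 ∨ c + d0 < 0) := by omega
        have hcb : ∀ (R C : Int), ((PySem.List.pyGet? board R).bind (fun row => PySem.List.pyGet? row C)) = pvCellA board R C := fun _ _ => rfl
        cases hcell : pvCellA board (r + d1) (c + d0) with
        | none => simp [pvALoop, pvBuild, pvScan, hifb, hcb, hcell, hinb]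
        | some cell =>
          have hc3 : cell = "" ∨ cell = "X" ∨ cell = "O" := by
            obtain ⟨row, hr, hc⟩ := pv_cell_memA board (r + d1) (c + d0) cell hcell
            exact hcells row hr cell hc
          by_cases he : cell = ""
          · simp [pvALoop, pvBuild, pvScan, hifb, hcb, hcell, hinb, he,
                  Ne.symm hoe, Ne.symm hpe]
          · by_cases hoppc : cell = opp
            · -- opponent tile: both the loop and the scan step
              have hk1 : k ≠ 0 := by
                rintro rfl
                have e1 : (1 + ((0 : Nat) : Int)) * d1 = d1 := by push_cast; ring
                have e0 : (1 + ((0 : Nat) : Int)) * d0 = d0 := by push_cast; ring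
                exact hout (by rw [e1, e0]; exact ⟨hb.2.1, hb.1, hb.2.2.2, hb.2.2.1⟩)
              have hk1' : 1 ≤ k := Nat.one_le_iff_ne_zero.mpr hk1
              have hkc : ((k - 1 : Nat) : Int) = (k : Int) - 1 := by
                push_cast [Nat.cast_sub hk1']; ring
              have heq1 : (r + d1) + (1 + ((k - 1 : Nat) : Int)) * d1 = r + (1 + (k : Int)) * d1 := by
                rw [hkc]; ring
              have heq0 : (c + d0) + (1 + ((k - 1 : Nat) : Int)) * d0 = c + (1 + (k : Int)) * d0 := by
                rw [hkc]; ring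
              have ihs := ih g (r + d1) (c + d0) (tiles + 1)
                ⟨k - 1, by omega, by omega, by rw [heq1, heq0]; exact hout⟩
              have hA : pvALoop d0 d1 opp player board (f + 1) r c tiles =
                  pvALoop d0 d1 opp player board f (r + d1) (c + d0) (tiles + 1) := by
                simp [pvALoop, hifb, hcell, hoppc, hoe]
              have hB : pvBuild d1 d0 board (g + 1) r c =
                  opp :: pvBuild d1 d0 board g (r + d1) (c + d0) := by
                simp [pvBuild, hinb, hcb, hcell, hoppc]
              rw [hA, ihs, hB]
              simp [pvScan]
            · -- cell = player (the only remaining value): the scan stops with the final check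
              have hply : cell = player := by
                rcases hc3 with h | h | h
                · exact absurd h he
                · rcases hp with hpx | hpo'
                  · rw [h, hpx]
                  · exact absurd (h.trans (by simp [hop, hpo'])) hoppc
                · rcases hp with hpx | hpo'
                  · exact absurd (h.trans (by simp [hop, hpx])) hoppc
                  · rw [h, hpo']
              simp [pvALoop, pvBuild, pvScan, hifb, hcb, hcell, hinb, hply, hpo, hpe,
                    Nat.lt_iff_add_one_le]

-- the ray leaves the 0..7 x 0..7 box within 9 steps when the direction is nonzero
lemma pv_escape (d0 d1 r c : Int) (hne : ¬ (d1 = 0 ∧ d0 = 0)) :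
    ∃ k : Nat, k < 9 ∧
      ¬ (0 ≤ r + (1 + (k : Int)) * d1 ∧ r + (1 + (k : Int)) * d1 ≤ 7 ∧
         0 ≤ c + (1 + (k : Int)) * d0 ∧ c + (1 + (k : Int)) * d0 ≤ 7) := by
  by_cases h0 : 0 ≤ r + d1 ∧ r + d1 ≤ 7 ∧ 0 ≤ c + d0 ∧ c + d0 ≤ 7
  · refine ⟨8, by omega, ?_⟩
    have e1 : (1 + ((8 : Nat) : Int)) * d1 = 9 * d1 := by push_cast; ring
    have e0 : (1 + ((8 : Nat) : Int)) * d0 = 9 * d0 := by push_cast; ring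
    rw [e1, e0]
    rcases not_and_or.mp hne with h | h <;> intro hcon <;> omega
  · refine ⟨0, by omega, ?_⟩
    have e1 : (1 + ((0 : Nat) : Int)) * d1 = d1 := by push_cast; ring
    have e0 : (1 + ((0 : Nat) : Int)) * d0 = d0 := by push_cast; ring
    rw [e1, e0]
    exact fun hcon => h0 ⟨hcon.1, hcon.2.1, hcon.2.2.1, hcon.2.2.2⟩

-- first step already off the board: A breaks at once
lemma pv_first_out (d0 d1 : Int) (opp player : String) (board : List (List String))
    (f : Nat) (r c : Int) (tiles : Nat)
    (h : ¬ (0 ≤ r + d1 ∧ r + d1 ≤ 7 ∧ 0 ≤ c + d0 ∧ c + d0 ≤ 7)) :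
    pvALoop d0 d1 opp player board (f + 1) r c tiles = false := by
  have hc : r + d1 > 7 ∨ r + d1 < 0 ∨ c + d0 > 7 ∨ c + d0 < 0 := by omega
  simp [pvALoop, hc]

-- first step already off the board: B's ray is empty
lemma pv_build_out (dr dc : Int) (board : List (List String))
    (f : Nat) (r c : Int)
    (h : ¬ (0 ≤ r + dr ∧ r + dr ≤ 7 ∧ 0 ≤ c + dc ∧ c + dc ≤ 7)) :
    pvBuild dr dc board (f + 1) r c = [] := by
  have hinb : pvInb (r + dr) (c + dc) = false := by
    unfold pvInb; simp only [decide_eq_false_iff_not]; omega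
  simp [pvBuild, hinb]

-- ===== VERDICT (by name: the statement is the Claim_ definition above) =====
theorem check_direction_spec : Claim_equal_check_direction := by
  unfold Claim_equal_check_direction
  intro move direction player board _ hpre
  obtain ⟨hlen, hrest⟩ := hpre
  unfold Spec_check_direction
  match direction with
  | [] => simp at hlen
  | [a] => simp at hlen
  | a :: b :: t =>
    have h1 : PySem.List.pyGet? (a :: b :: t) 1 = some b := by
      rw [show (1 : Int) = ((0 : Nat) : Int) + 1 by simp, PySem.List.pyGet?_cons_succ]
      simp
    have h0 : PySem.List.pyGet? (a :: b :: t) 0 = some a := PySem.List.pyGet?_zero_cons a (b :: t)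
    unfold check_direction check_direction_alt
    rw [h1, h0]
    rcases hrest with hout | ⟨hne, hp, _, hrows⟩
    · -- the first step leaves the board: A breaks at once, B's ray is empty
      simp only [List.getD_cons_succ, List.getD_cons_zero] at hout
      have hA := pv_first_out a b (if player = "O" then "X" else "O") player board
        9 move.1 move.2 0 hout
      have hB := pv_build_out b a board 8 move.1 move.2 hout
      simp only [show (10 : Nat) = 9 + 1 from rfl, show (9 : Nat) = 8 + 1 from rfl, hA, hB]
      simp [pvScan]
    · -- interior case: the loop invariant
      have hcells : ∀ row ∈ board, ∀ cell ∈ row, cell = "" ∨ cell = "X" ∨ cell = "O" :=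
        fun row hr => (hrows row hr).2
      have hne' : ¬ ((b : Int) = 0 ∧ (a : Int) = 0) := by simpa using hne
      obtain ⟨k, hk9, hout⟩ := pv_escape a b move.1 move.2 hne'
      have := pv_main a b (if player = "O" then "X" else "O") player board rfl hp hcells
        10 9 move.1 move.2 0 ⟨k, by omega, hk9, hout⟩
      simpa using this
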